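-- pv_equiv track=rewrite | github.com/skyler-saville/jukebotx-service-full | packages/infra/jukebotx_infra/suno/client.py | _score_lyrics_candidate
-- ===== SOURCE A (Python) =====
-- def _looks_like_ui_or_boilerplate(text: str) -> bool:
--     lowered = text.lower()
--     bad_markers = (
--         "cookie",
--         "privacy",
--         "terms",
--         "sign up",
--         "log in",
--         "pricing",
--         "subscribe",
--         "download",
--         "app store",
--         "google play",
--         "enable cookies",
--         "javascript",
--     )
--     return any(m in lowered for m in bad_markers)
--
-- def _score_lyrics_candidate(text: str) -> int:
--     """
--     Score a candidate as lyrics without requiring [Verse]/[Chorus] tags.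
--     """
--     t = text.strip()
--     if len(t) < 200:
--         return 0
--     if _looks_like_ui_or_boilerplate(t):
--         return 0
--
--     lines = [ln for ln in t.splitlines() if ln.strip()]
--     if len(lines) < 6:
--         return 0
--
--     score = 0
--
--     score += min(240, len(lines) * 10)
--
--     moderate = sum(1 for ln in lines if 10 <= len(ln) <= 120)
--     very_long = sum(1 for ln in lines if len(ln) > 220)
--
--     score += min(260, moderate * 10)
--     score -= min(260, very_long * 40)
--
--     no_period_end = sum(1 for ln in lines if not ln.strip().endswith("."))
--     score += min(140, no_period_end * 6)
--
--     score += min(200, len(t) // 45)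
--
--     return score
-- ===== SOURCE B (Python) =====
-- def _looks_like_ui_or_boilerplate(text: str) -> bool:
--     lowered = text.lower()
--     bad_markers = (
--         "cookie",
--         "privacy",
--         "terms",
--         "sign up",
--         "log in",
--         "pricing",
--         "subscribe",
--         "download",
--         "app store",
--         "google play",
--         "enable cookies",
--         "javascript",
--     )
--     return any(m in lowered for m in bad_markers)
--
--
-- def _score_lyrics_candidate(text: str) -> int:
--     t = text.strip()
--     if len(t) < 200:
--         return 0
--     if _looks_like_ui_or_boilerplate(t):
--         return 0
--
--     lines = [ln for ln in t.splitlines() if ln.strip()]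
--     if len(lines) < 6:
--         return 0
--
--     # Histogram algorithm: one pass builds a frequency table keyed by
--     # (line length, ends-with-period); the three counts are then read off
--     # the table's (few, distinct) keys instead of re-scanning the lines.
--     freq = {}
--     for ln in lines:
--         key = (len(ln), ln.strip().endswith("."))
--         freq[key] = freq.get(key, 0) + 1
--
--     moderate = sum(v for (n, _), v in freq.items() if 10 <= n <= 120)
--     very_long = sum(v for (n, _), v in freq.items() if n > 220)
--     no_period_end = sum(v for (_, e), v in freq.items() if not e)
--
--     return (min(240, len(lines) * 10)
--             + min(260, moderate * 10)
--             - min(260, very_long * 40)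
--             + min(140, no_period_end * 6)
--             + min(200, len(t) // 45))
-- ===== Notes on version B (the rewrite author's own statement) =====
-- stated objective: alternative
-- what changed: Instead of scanning the line list once per criterion with sum-comprehensions, B builds a frequency table (histogram) keyed by (line length, ends-with-period) in a single pass and derives the moderate/very_long/no_period_end counts by summing frequencies over the table's distinct keys; the score is then assembled in one expression.
import Mathlib
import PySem

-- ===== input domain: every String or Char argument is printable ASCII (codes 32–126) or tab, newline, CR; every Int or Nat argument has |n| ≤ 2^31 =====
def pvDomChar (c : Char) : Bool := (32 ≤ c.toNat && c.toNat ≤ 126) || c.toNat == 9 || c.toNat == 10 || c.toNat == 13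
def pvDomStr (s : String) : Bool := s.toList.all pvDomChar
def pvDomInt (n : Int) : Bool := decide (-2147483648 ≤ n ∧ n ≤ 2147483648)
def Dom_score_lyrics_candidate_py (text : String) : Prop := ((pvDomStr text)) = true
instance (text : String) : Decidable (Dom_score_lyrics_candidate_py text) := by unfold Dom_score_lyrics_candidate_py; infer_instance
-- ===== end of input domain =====

-- B replaces A's per-criterion sum-comprehensions over the lines by a frequency table
-- keyed by (line length, ends-with-period) built in one pass, reading the three counts
-- off the table's distinct keys (alternative algorithm, same result).

-- ===== PORT A =====
def pvBadMarkers : List (List Char) :=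
  ["cookie".toList, "privacy".toList, "terms".toList, "sign up".toList, "log in".toList,
   "pricing".toList, "subscribe".toList, "download".toList, "app store".toList,
   "google play".toList, "enable cookies".toList, "javascript".toList]

def pvLooksLikeBoilerplate (t : List Char) : Bool :=
  let lowered := PySem.Chars.lower t
  pvBadMarkers.any (fun m => PySem.Chars.isIn m lowered)

def score_lyrics_candidate_py (text : String) : Int :=
  let t := PySem.Chars.strip text.toList
  if t.length < 200 then 0
  else if pvLooksLikeBoilerplate t then 0
  else
    let lines := (PySem.Chars.splitlines t).filter (fun ln => PySem.Chars.strip ln ≠ [])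
    if lines.length < 6 then 0
    else
      let score : Int := 0
      let score := score + min 240 ((lines.length : Int) * 10)
      let moderate := (lines.map (fun ln => if 10 ≤ ln.length ∧ ln.length ≤ 120 then (1 : Int) else 0)).sum
      let very_long := (lines.map (fun ln => if ln.length > 220 then (1 : Int) else 0)).sum
      let score := score + min 260 (moderate * 10)
      let score := score - min 260 (very_long * 40)
      let no_period_end := (lines.map (fun ln => if ¬ (PySem.Chars.endswith (PySem.Chars.strip ln) ['.'] = true) then (1 : Int) else 0)).sum
      let score := score + min 140 (no_period_end * 6)
      let score := score + min 200 (PySem.Int.floordiv (t.length : Int) 45)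
      score

-- ===== PORT B =====
-- the histogram key of a line: (len(ln), ln.strip().endswith("."))
def pvLineKey (ln : List Char) : Int × Bool :=
  ((ln.length : Int), PySem.Chars.endswith (PySem.Chars.strip ln) ['.'])

def score_lyrics_candidate_py_alt (text : String) : Int :=
  let t := PySem.Chars.strip text.toList
  if t.length < 200 then 0
  else if pvLooksLikeBoilerplate t then 0
  else
    let lines := (PySem.Chars.splitlines t).filter (fun ln => PySem.Chars.strip ln ≠ [])
    if lines.length < 6 then 0
    else
      -- freq[key] = freq.get(key, 0) + 1
      let freq : PySem.Dict (Int × Bool) Int :=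
        lines.foldl (fun d ln => d.insert (pvLineKey ln) (d.getD (pvLineKey ln) 0 + 1)) PySem.Dict.empty
      let moderate := (freq.items.map (fun p => if 10 ≤ p.1.1 ∧ p.1.1 ≤ 120 then p.2 else 0)).sum
      let very_long := (freq.items.map (fun p => if p.1.1 > 220 then p.2 else 0)).sum
      let no_period_end := (freq.items.map (fun p => if p.1.2 = false then p.2 else 0)).sum
      min 240 ((lines.length : Int) * 10)
        + min 260 (moderate * 10)
        - min 260 (very_long * 40)
        + min 140 (no_period_end * 6)
        + min 200 (PySem.Int.floordiv (t.length : Int) 45)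

-- ===== PRECONDITION & SPEC =====
def Spec_score_lyrics_candidate_py (text : String) (out : Int) : Prop := out = score_lyrics_candidate_py_alt text
instance (text : String) (out : Int) : Decidable (Spec_score_lyrics_candidate_py text out) := by unfold Spec_score_lyrics_candidate_py; infer_instance

-- ===== CLAIM =====
def Claim_equal_score_lyrics_candidate_py : Prop := ∀ (text : String), Dom_score_lyrics_candidate_py text → Spec_score_lyrics_candidate_py text (score_lyrics_candidate_py text)

-- ===== LEMMAS AND PROOFS =====
-- over a Nodup list containing y, the indicator sum picks out exactly y's term
theorem pv_sum_single {κ : Type} [DecidableEq κ] (P : κ → Prop) [DecidablePred P] (y : κ) :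
    ∀ (S : List κ), S.Nodup → y ∈ S →
      (S.map (fun k => if P k ∧ y = k then (1 : Int) else 0)).sum = if P y then 1 else 0 := by
  intro S
  induction S with
  | nil => intro _ h; cases h
  | cons z T ih =>
    intro hn hm
    have hn' := hn
    rw [List.nodup_cons] at hn'
    rcases List.mem_cons.mp hm with hyz | hyT
    · subst hyz
      have hz : (T.map (fun k => if P k ∧ y = k then (1 : Int) else 0)).sum = 0 := by
        apply List.sum_eq_zero
        intro x hx
        rcases List.mem_map.mp hx with ⟨k, hk, rfl⟩
        have : ¬ (P k ∧ y = k) := fun h => hn'.1 (h.2 ▸ hk)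
        simp [this]
      simp [hz]
    · have hzy : z ≠ y := fun h => hn'.1 (h ▸ hyT)
      have hterm : (if P z ∧ y = z then (1 : Int) else 0) = 0 := by
        have : ¬ (P z ∧ y = z) := fun h => hzy h.2.symm
        simp [this]
      simp only [List.map_cons, List.sum_cons, hterm, zero_add]
      exact ih hn'.2 hyT

-- summing 'if P k then count k xs else 0' over any Nodup superset of xs counts P in xs
theorem pv_sum_count {κ : Type} [BEq κ] [LawfulBEq κ] [DecidableEq κ] (P : κ → Prop) [DecidablePred P]
    (xs : List κ) : ∀ (S : List κ), S.Nodup → (∀ x ∈ xs, x ∈ S) →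
      (S.map (fun k => if P k then (List.count k xs : Int) else 0)).sum
        = ((xs.countP (fun k => decide (P k)) : Nat) : Int) := by
  induction xs with
  | nil =>
    intro S _ _
    simp
  | cons y rest ih =>
    intro S hn hs
    have hsplit : ∀ k : κ, (if P k then (List.count k (y :: rest) : Int) else 0)
        = (if P k then (List.count k rest : Int) else 0) + (if P k ∧ y = k then (1 : Int) else 0) := by
      intro k
      by_cases hP : P k
      · by_cases hy : y = k
        · simp [hP, hy]
        · simp [hP, hy]
      · simp [hP]
    have hmap : S.map (fun k => if P k then (List.count k (y :: rest) : Int) else 0)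
        = S.map (fun k => (if P k then (List.count k rest : Int) else 0) + (if P k ∧ y = k then (1 : Int) else 0)) := by
      apply List.map_congr_left; intro k _; exact hsplit k
    rw [hmap, PySem.List.sum_map_add_int,
        ih S hn (fun x hx => hs x (List.mem_cons_of_mem _ hx)),
        pv_sum_single P y S hn (hs y List.mem_cons_self)]
    rw [List.countP_cons]
    by_cases hP : P y <;> simp [hP]

-- a Prop-conditioned 0/1-sum is countP
theorem pv_sum_ite_prop {α : Type} (P : α → Prop) [DecidablePred P] (xs : List α) :
    (xs.map (fun x => if P x then (1 : Int) else 0)).sum = ((xs.countP (fun x => decide (P x)) : Nat) : Int) := by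
  rw [← PySem.List.sum_map_ite_one_zero (fun x => decide (P x)) xs]
  congr 1
  apply List.map_congr_left
  intro x _
  by_cases h : P x <;> simp [h]

-- B's sum over the frequency table equals A's countP over the lines, for any key predicate
theorem pv_freq_sum (P : Int × Bool → Prop) [DecidablePred P] (lines : List (List Char)) :
    (((lines.foldl (fun d ln => d.insert (pvLineKey ln) (d.getD (pvLineKey ln) 0 + 1)) PySem.Dict.empty).items).map
        (fun p => if P p.1 then p.2 else 0)).sum
      = ((lines.countP (fun ln => decide (P (pvLineKey ln))) : Nat) : Int) := by
  have hfold : lines.foldl (fun d ln => d.insert (pvLineKey ln) (d.getD (pvLineKey ln) 0 + 1)) PySem.Dict.empty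
      = PySem.Dict.counter (lines.map pvLineKey) := by
    rw [← PySem.Dict.foldl_insert_getD_add_one_eq_counter, List.foldl_map]
  rw [hfold, PySem.Dict.items_counter, List.map_map]
  have : ((fun p : (Int × Bool) × Int => if P p.1 then p.2 else 0) ∘ fun k => (k, (List.count k (lines.map pvLineKey) : Int)))
      = fun k => if P k then (List.count k (lines.map pvLineKey) : Int) else 0 := rfl
  rw [this,
      pv_sum_count P (lines.map pvLineKey) (PySem.Set.ofList (lines.map pvLineKey))
        (PySem.Set.nodup_ofList _) (fun x hx => (PySem.Set.mem_ofList _ _).mpr hx),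
      List.countP_map]
  rfl

-- ===== VERDICT =====
theorem score_lyrics_candidate_py_spec : Claim_equal_score_lyrics_candidate_py := by
  intro text _
  unfold Spec_score_lyrics_candidate_py score_lyrics_candidate_py score_lyrics_candidate_py_alt
  dsimp only
  split_ifs with h1 h2 h3
  · rfl
  · rfl
  · rfl
  · set lines := ((PySem.Chars.splitlines (PySem.Chars.strip text.toList)).filter
      (fun ln => PySem.Chars.strip ln ≠ [])) with hlines
    rw [pv_freq_sum (fun k => 10 ≤ k.1 ∧ k.1 ≤ 120) lines,
        pv_freq_sum (fun k => k.1 > 220) lines,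
        pv_freq_sum (fun k => k.2 = false) lines,
        pv_sum_ite_prop (fun ln : List Char => 10 ≤ ln.length ∧ ln.length ≤ 120) lines,
        pv_sum_ite_prop (fun ln : List Char => ln.length > 220) lines,
        pv_sum_ite_prop (fun ln : List Char => ¬ (PySem.Chars.endswith (PySem.Chars.strip ln) ['.'] = true)) lines]
    have e1 : lines.countP (fun ln => decide ((fun k : Int × Bool => 10 ≤ k.1 ∧ k.1 ≤ 120) (pvLineKey ln)))
        = lines.countP (fun ln => decide (10 ≤ ln.length ∧ ln.length ≤ 120)) := by
      apply List.countP_congr; intro ln _; simp [pvLineKey]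
    have e2 : lines.countP (fun ln => decide ((fun k : Int × Bool => k.1 > 220) (pvLineKey ln)))
        = lines.countP (fun ln => decide (ln.length > 220)) := by
      apply List.countP_congr; intro ln _; simp [pvLineKey]
    have e3 : lines.countP (fun ln => decide ((fun k : Int × Bool => k.2 = false) (pvLineKey ln)))
        = lines.countP (fun ln => decide (¬ (PySem.Chars.endswith (PySem.Chars.strip ln) ['.'] = true))) := by
      apply List.countP_congr; intro ln _; simp [pvLineKey]
    rw [e1, e2, e3]
    ring
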